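-- pv_equiv track=rewrite | github.com/kai3n/Daily-commit-project | jamespak/week15/2553. Separate the Digits in an Array.py | separateDigits
-- ===== SOURCE A (Python) =====
-- from typing import List
--
-- def separateDigits(nums: List[int]) -> List[int]:
--     res = []
--
--     for num in nums:
--         tmp = []
--         while num >= 10:
--             tmp.append(num % 10)
--             num //= 10
--         tmp.append(num)
--         res.extend(tmp[::-1])
--     return res
-- ===== SOURCE B (Python) =====
-- from typing import List
--
-- def separateDigits(nums: List[int]) -> List[int]:
--     res = []
--     for num in nums:
--         if num < 10:
--             res.append(num)
--         else:
--             res.extend(int(c) for c in str(num))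
--     return res
-- ===== Notes on version B (the rewrite author's own statement) =====
-- stated objective: alternative
-- what changed: Replaces the modular-arithmetic digit loop with a reversal buffer (tmp[::-1]) by decimal string conversion traversed left-to-right, appending numbers below 10 (including negatives and 0) whole.
import Mathlib
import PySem

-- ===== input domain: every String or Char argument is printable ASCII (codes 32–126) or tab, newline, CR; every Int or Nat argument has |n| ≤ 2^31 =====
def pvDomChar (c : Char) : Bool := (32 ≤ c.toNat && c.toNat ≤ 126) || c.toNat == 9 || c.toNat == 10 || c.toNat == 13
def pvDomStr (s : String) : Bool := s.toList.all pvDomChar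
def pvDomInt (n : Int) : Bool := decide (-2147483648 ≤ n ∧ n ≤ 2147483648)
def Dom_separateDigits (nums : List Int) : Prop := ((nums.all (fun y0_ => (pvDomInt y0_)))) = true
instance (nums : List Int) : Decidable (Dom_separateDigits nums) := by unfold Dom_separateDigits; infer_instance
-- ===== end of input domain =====

-- B replaces A's modular-arithmetic digit loop + reversal buffer by decimal string conversion; return value only, same values.

-- ===== PORT A =====
-- A's inner while loop: tmp grows with num % 10 while num >= 10, then num is appended.
def sdTmp (num : Int) (tmp : List Int) : List Int :=
  if _h : 10 ≤ num then
    sdTmp (PySem.Int.floordiv num 10) (tmp ++ [PySem.Int.mod num 10])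
  else
    tmp ++ [num]
termination_by num.toNat
decreasing_by
  rw [PySem.Int.floordiv_eq_ediv_of_pos (by omega : (0:Int) < 10)]
  omega

-- res.extend(tmp[::-1]) : tmp[::-1] is slice? with step -1 (never raises; getD [] is unreachable)
def separateDigits (nums : List Int) : List Int :=
  nums.foldl (fun res num => res ++ ((PySem.List.slice? (sdTmp num []) none none (-1)).getD [])) []

-- ===== PORT B =====
-- int(c) for a single character c (exact on the digit characters str(num) produces for num >= 10)
def sdCharVal (c : Char) : Int := (PySem.Int.ofChars? [c]).getD 0

def separateDigits_alt (nums : List Int) : List Int :=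
  nums.foldl (fun res num =>
    if num < 10 then res ++ [num]
    else res ++ (PySem.Int.toStr num).toList.map sdCharVal) []

-- ===== PRECONDITION & SPEC =====
def Spec_separateDigits (nums : List Int) (out : List Int) : Prop := out = separateDigits_alt nums
instance (nums : List Int) (out : List Int) : Decidable (Spec_separateDigits nums out) := by unfold Spec_separateDigits; infer_instance

-- ===== CLAIM (what is proved, stated in full; the proofs are below) =====
def Claim_equal_separateDigits : Prop := ∀ (nums : List Int), Dom_separateDigits nums → Spec_separateDigits nums (separateDigits nums)

-- ===== LEMMAS AND PROOFS =====

-- reference digit list of a natural number, most significant first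
def sdDigs (m : Nat) : List Int :=
  if _h : m < 10 then [(m : Int)] else sdDigs (m / 10) ++ [((m % 10 : Nat) : Int)]
termination_by m
decreasing_by omega

theorem sdTmp_natCast (m : Nat) (tmp : List Int) :
    sdTmp (m : Int) tmp = tmp ++ (sdDigs m).reverse := by
  induction m using Nat.strong_induction_on generalizing tmp with
  | _ m ih =>
    by_cases h : m < 10
    · rw [sdTmp, sdDigs]
      simp [h, (show ¬ (10 : Int) ≤ (m : Int) by omega)]
    · rw [sdTmp, sdDigs]
      simp only [(show (10:Int) ≤ (m:Int) by omega), dite_true, h, dite_false]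
      rw [(by exact_mod_cast PySem.Int.floordiv_natCast m 10 :
            PySem.Int.floordiv (m:Int) 10 = ((m / 10 : Nat) : Int)),
          (by exact_mod_cast PySem.Int.mod_natCast m 10 :
            PySem.Int.mod (m:Int) 10 = ((m % 10 : Nat) : Int))]
      rw [ih (m / 10) (by omega)]
      simp

theorem sdTmp_neg (num : Int) (h : num < 10) (tmp : List Int) :
    sdTmp num tmp = tmp ++ [num] := by
  rw [sdTmp]; simp [(show ¬ (10:Int) ≤ num by omega)]

theorem sdCharVal_digitChar (d : Nat) (hd : d < 10) :
    sdCharVal (Nat.digitChar d) = (d : Int) := by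
  interval_cases d <;> decide

theorem toDigitsCore_map (f : Nat) : ∀ (m : Nat), m < f → ∀ (acc : List Char),
    (Nat.toDigitsCore 10 f m acc).map sdCharVal = sdDigs m ++ acc.map sdCharVal := by
  induction f with
  | zero => intro m hm; omega
  | succ f ih =>
    intro m hm acc
    rw [Nat.toDigitsCore]
    by_cases h : m / 10 = 0
    · simp only [h, if_true]
      rw [sdDigs]
      simp only [(show m < 10 by omega), dite_true, List.map_cons]
      rw [sdCharVal_digitChar (m % 10) (by omega)]
      simp [Nat.mod_eq_of_lt (by omega : m < 10)]
    · simp only [h, if_false]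
      rw [ih (m / 10) (by omega) _]
      conv_rhs => rw [sdDigs]
      simp only [(show ¬ m < 10 by omega), dite_false, List.map_cons,
        sdCharVal_digitChar (m % 10) (by omega)]
      simp

theorem toChars_map (m : Nat) (h : 10 ≤ m) :
    (PySem.Int.toChars (m : Int)).map sdCharVal = sdDigs m := by
  rw [PySem.Int.toChars]
  simp only [(show ¬ (m : Int) < 0 by omega), if_false, Int.toNat_natCast]
  rw [Nat.toDigits]
  rw [toDigitsCore_map (m + 1) m (by omega) []]
  simp

-- per-element agreement of the two fold steps
theorem sd_step_eq (num : Int) (res : List Int) :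
    res ++ ((PySem.List.slice? (sdTmp num []) none none (-1)).getD []) =
    (if num < 10 then res ++ [num]
     else res ++ (PySem.Int.toStr num).toList.map sdCharVal) := by
  rw [PySem.List.slice?_none_none_neg_one]
  by_cases h : num < 10
  · rw [sdTmp_neg num h]
    simp [h]
  · obtain ⟨m, rfl⟩ : ∃ m : Nat, num = (m : Int) :=
      ⟨num.toNat, by omega⟩
    rw [sdTmp_natCast m []]
    simp only [h, if_false, Option.getD_some, List.nil_append, List.reverse_reverse]
    rw [PySem.Int.toList_toStr]
    rw [toChars_map m (by omega)]

theorem sd_fold_eq (nums : List Int) (res : List Int) :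
    nums.foldl (fun res num => res ++ ((PySem.List.slice? (sdTmp num []) none none (-1)).getD [])) res =
    nums.foldl (fun res num =>
      if num < 10 then res ++ [num]
      else res ++ (PySem.Int.toStr num).toList.map sdCharVal) res := by
  induction nums generalizing res with
  | nil => rfl
  | cons x xs ih =>
    simp only [List.foldl_cons]
    rw [sd_step_eq x res, ih]

-- ===== VERDICT (by name: the statement is the Claim_ definition above) =====
theorem separateDigits_spec : Claim_equal_separateDigits := by
  intro nums _
  unfold Spec_separateDigits separateDigits separateDigits_alt
  exact sd_fold_eq nums []
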